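-- pv_equiv track=rewrite | github.com/Anshulgada/Impact-Training | Coding Challenge 22.py | simulate_training
-- ===== SOURCE A (Python) =====
-- def simulate_training(Xena_strength, Ragnar_strength, Galahad_strength, Xena_intensity, Ragnar_intensity, Galahad_intensity):
--     sessions = 0
--     while Xena_strength != Ragnar_strength or Ragnar_strength != Galahad_strength:
--         Xena_strength += Xena_intensity
--         Ragnar_strength += Ragnar_intensity
--         Galahad_strength += Galahad_intensity
--         sessions += 1
--
--         # Check if strengths diverge infinitely
--         if sessions > 1000:
--             return -1
--
--     return sessions
-- ===== SOURCE B (Python) =====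
-- def simulate_training(Xena_strength, Ragnar_strength, Galahad_strength, Xena_intensity, Ragnar_intensity, Galahad_intensity):
--     # Closed form: equality after n sessions means
--     #   n*(Xena_intensity - Ragnar_intensity) == Ragnar_strength - Xena_strength
--     #   n*(Ragnar_intensity - Galahad_intensity) == Galahad_strength - Ragnar_strength
--     def solve(dc, ds):
--         # solutions of n*dc == ds over n >= 0: 'all', a single n, or None
--         if dc == 0:
--             return 'all' if ds == 0 else None
--         if ds % dc != 0:
--             return None
--         n = ds // dc
--         return n if n >= 0 else None
--
--     s1 = solve(Xena_intensity - Ragnar_intensity, Ragnar_strength - Xena_strength)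
--     s2 = solve(Ragnar_intensity - Galahad_intensity, Galahad_strength - Ragnar_strength)
--     if s1 is None or s2 is None:
--         return -1
--     if s1 == 'all':
--         n = 0 if s2 == 'all' else s2
--     elif s2 == 'all':
--         n = s1
--     else:
--         if s1 != s2:
--             return -1
--         n = s1
--     return n if n <= 1000 else -1
-- ===== Notes on version B (the rewrite author's own statement) =====
-- stated objective: faster
-- what changed: Replaced the session-by-session simulation loop (up to 1001 iterations) with a closed-form solve of the two linear equations n*(Xi-Ri)=Rs-Xs and n*(Ri-Gi)=Gs-Rs, combining the per-pair solution sets (none / unique n / all n) and applying the 0<=n<=1000 cap.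
import Mathlib
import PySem

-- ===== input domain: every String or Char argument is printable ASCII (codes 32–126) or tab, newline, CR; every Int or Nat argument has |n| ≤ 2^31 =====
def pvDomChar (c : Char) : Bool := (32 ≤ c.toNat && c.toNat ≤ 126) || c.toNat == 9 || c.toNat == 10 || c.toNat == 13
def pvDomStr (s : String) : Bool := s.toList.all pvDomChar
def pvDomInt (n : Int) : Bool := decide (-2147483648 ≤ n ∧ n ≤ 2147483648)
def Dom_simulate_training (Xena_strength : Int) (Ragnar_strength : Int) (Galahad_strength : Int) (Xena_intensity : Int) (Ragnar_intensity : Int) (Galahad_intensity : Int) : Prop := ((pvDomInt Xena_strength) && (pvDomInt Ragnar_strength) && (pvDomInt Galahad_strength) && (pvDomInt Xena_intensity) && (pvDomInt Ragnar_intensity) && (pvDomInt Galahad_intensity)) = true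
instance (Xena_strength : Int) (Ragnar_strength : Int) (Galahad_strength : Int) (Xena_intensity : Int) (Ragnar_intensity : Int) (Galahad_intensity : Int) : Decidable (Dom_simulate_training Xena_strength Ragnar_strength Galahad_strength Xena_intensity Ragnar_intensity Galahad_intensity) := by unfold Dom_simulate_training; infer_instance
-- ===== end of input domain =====

-- B replaces A's session-by-session simulation loop with a closed-form solve of the two
-- linear equations n·(Xi−Ri)=Rs−Xs, n·(Ri−Gi)=Gs−Rs (objective: faster — O(1) vs up to 1001 iterations).

-- ===== PORT A =====
-- the Python while loop; `sessions` is the loop counter, capped at 1000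
def simulate_training_loop (x r g xi ri gi sessions : Int) : Int :=
  if x ≠ r ∨ r ≠ g then
    let x' := x + xi
    let r' := r + ri
    let g' := g + gi
    let s' := sessions + 1
    if s' > 1000 then -1
    else simulate_training_loop x' r' g' xi ri gi s'
  else sessions
termination_by (1001 - sessions).toNat
decreasing_by omega

def simulate_training (Xena_strength : Int) (Ragnar_strength : Int) (Galahad_strength : Int) (Xena_intensity : Int) (Ragnar_intensity : Int) (Galahad_intensity : Int) : Int :=
  simulate_training_loop Xena_strength Ragnar_strength Galahad_strength Xena_intensity Ragnar_intensity Galahad_intensity 0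

-- ===== PORT B =====
-- result of Source B's `solve`: Python's None / 'all' / an integer n
inductive SolveRes where
  | noSol : SolveRes
  | all : SolveRes
  | val : Int → SolveRes
deriving DecidableEq, Repr

-- Source B `solve(dc, ds)`: solutions of n*dc == ds over n >= 0
def solveLin (dc ds : Int) : SolveRes :=
  if dc = 0 then (if ds = 0 then .all else .noSol)
  else if PySem.Int.mod ds dc ≠ 0 then .noSol
  else  -- Source B's local `n = ds // dc` inlined
    if PySem.Int.floordiv ds dc ≥ 0 then .val (PySem.Int.floordiv ds dc) else .noSol

-- final `return n if n <= 1000 else -1`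
def capB (n : Int) : Int := if n ≤ 1000 then n else -1

def simulate_training_alt (Xena_strength : Int) (Ragnar_strength : Int) (Galahad_strength : Int) (Xena_intensity : Int) (Ragnar_intensity : Int) (Galahad_intensity : Int) : Int :=
  let s1 := solveLin (Xena_intensity - Ragnar_intensity) (Ragnar_strength - Xena_strength)
  let s2 := solveLin (Ragnar_intensity - Galahad_intensity) (Galahad_strength - Ragnar_strength)
  match s1, s2 with
  | .noSol, _ => -1
  | _, .noSol => -1
  | .all, .all => capB 0
  | .all, .val n => capB n
  | .val n, .all => capB n
  | .val n1, .val n2 => if n1 ≠ n2 then -1 else capB n1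

-- ===== PRECONDITION & SPEC =====
def Spec_simulate_training (Xena_strength : Int) (Ragnar_strength : Int) (Galahad_strength : Int) (Xena_intensity : Int) (Ragnar_intensity : Int) (Galahad_intensity : Int) (out : Int) : Prop := out = simulate_training_alt Xena_strength Ragnar_strength Galahad_strength Xena_intensity Ragnar_intensity Galahad_intensity
instance (Xena_strength : Int) (Ragnar_strength : Int) (Galahad_strength : Int) (Xena_intensity : Int) (Ragnar_intensity : Int) (Galahad_intensity : Int) (out : Int) : Decidable (Spec_simulate_training Xena_strength Ragnar_strength Galahad_strength Xena_intensity Ragnar_intensity Galahad_intensity out) := by unfold Spec_simulate_training; infer_instance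

-- ===== CLAIM (what is proved, stated in full; the proofs are below) =====
def Claim_equal_simulate_training : Prop := ∀ (Xena_strength : Int) (Ragnar_strength : Int) (Galahad_strength : Int) (Xena_intensity : Int) (Ragnar_intensity : Int) (Galahad_intensity : Int), Dom_simulate_training Xena_strength Ragnar_strength Galahad_strength Xena_intensity Ragnar_intensity Galahad_intensity → Spec_simulate_training Xena_strength Ragnar_strength Galahad_strength Xena_intensity Ragnar_intensity Galahad_intensity (simulate_training Xena_strength Ragnar_strength Galahad_strength Xena_intensity Ragnar_intensity Galahad_intensity)

-- ===== LEMMAS AND PROOFS =====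

-- linear rearrangement used to relate the state equality with the solved equation
lemma lin_iff (a b c d k : Int) : a + k * b = c + k * d ↔ k * (b - d) = c - a := by
  have h := mul_sub k b d
  constructor <;> intro hh <;> linarith

-- characterisation of solveLin
lemma solveLin_all_iff (dc ds : Int) : solveLin dc ds = .all ↔ dc = 0 ∧ ds = 0 := by
  unfold solveLin
  split_ifs <;> simp_all

lemma solveLin_val_iff (dc ds n : Int) :
    solveLin dc ds = .val n ↔ dc ≠ 0 ∧ n * dc = ds ∧ 0 ≤ n := by
  unfold solveLin
  split_ifs with h1 h2 h3 h4
  · simp_all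
  · simp_all
  · constructor
    · intro h; cases h
    · rintro ⟨-, hmul, hn⟩
      exact absurd ((PySem.Int.mod_eq_zero_iff_dvd ds dc).mpr ⟨n, by linarith⟩) h3
  · have h0 : PySem.Int.mod ds dc = 0 := by omega
    have hdm := PySem.Int.floordiv_mul_add_mod ds dc
    constructor
    · intro h; cases h
      refine ⟨h1, by omega, h4⟩
    · rintro ⟨-, hmul, hn⟩
      have hq : PySem.Int.floordiv ds dc = n :=
        mul_right_cancel₀ h1 (by omega : PySem.Int.floordiv ds dc * dc = n * dc)
      rw [hq]
  · have h0 : PySem.Int.mod ds dc = 0 := by omega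
    have hdm := PySem.Int.floordiv_mul_add_mod ds dc
    constructor
    · intro h; cases h
    · rintro ⟨-, hmul, hn⟩
      have hq : PySem.Int.floordiv ds dc = n :=
        mul_right_cancel₀ h1 (by omega : PySem.Int.floordiv ds dc * dc = n * dc)
      omega

lemma solveLin_none_iff (dc ds : Int) :
    solveLin dc ds = .noSol ↔ ∀ k : Int, 0 ≤ k → k * dc ≠ ds := by
  constructor
  · intro h k hk hkeq
    by_cases hdc : dc = 0
    · have : ds = 0 := by subst hdc; simpa using hkeq.symm
      have := (solveLin_all_iff dc ds).mpr ⟨hdc, this⟩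
      rw [this] at h; cases h
    · have := (solveLin_val_iff dc ds k).mpr ⟨hdc, hkeq, hk⟩
      rw [this] at h; cases h
  · intro h
    cases hs : solveLin dc ds with
    | noSol => rfl
    | all =>
        obtain ⟨h0, hds⟩ := (solveLin_all_iff dc ds).mp hs
        exact absurd (by simp [h0, hds]) (h 0 le_rfl)
    | val n =>
        obtain ⟨-, hmul, hn⟩ := (solveLin_val_iff dc ds n).mp hs
        exact absurd hmul (h n hn)

-- the loop returns -1 when no equalisation step exists up to the cap
lemma loop_none (m : Nat) : ∀ (X R G xi ri gi s : Int), s = 1000 - (m : Int) →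
    (∀ k : Int, s ≤ k → k ≤ 1000 →
      ¬(X + k * xi = R + k * ri ∧ R + k * ri = G + k * gi)) →
    simulate_training_loop (X + s * xi) (R + s * ri) (G + s * gi) xi ri gi s = -1 := by
  induction m with
  | zero =>
      intro X R G xi ri gi s hs h
      rw [simulate_training_loop]
      have hne := h s (le_refl s) (by omega)
      have hcond : (X + s * xi ≠ R + s * ri ∨ R + s * ri ≠ G + s * gi) := by tauto
      simp only [if_pos hcond]
      have : s + 1 > 1000 := by omega
      simp [this]
  | succ m ih =>
      intro X R G xi ri gi s hs h
      rw [simulate_training_loop]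
      have hne := h s (le_refl s) (by omega)
      have hcond : (X + s * xi ≠ R + s * ri ∨ R + s * ri ≠ G + s * gi) := by tauto
      simp only [if_pos hcond]
      have hle : ¬ (s + 1 > 1000) := by omega
      simp only [if_neg hle]
      have hx : X + s * xi + xi = X + (s + 1) * xi := by ring
      have hr : R + s * ri + ri = R + (s + 1) * ri := by ring
      have hg : G + s * gi + gi = G + (s + 1) * gi := by ring
      rw [hx, hr, hg]
      exact ih X R G xi ri gi (s + 1) (by omega) (fun k hk hk2 => h k (by omega) hk2)

-- the loop returns n when n is the first equalisation step (n ≤ 1000)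
lemma loop_hit (d : Nat) : ∀ (X R G xi ri gi s n : Int), n = s + (d : Int) → n ≤ 1000 →
    (X + n * xi = R + n * ri ∧ R + n * ri = G + n * gi) →
    (∀ k : Int, s ≤ k → k < n →
      ¬(X + k * xi = R + k * ri ∧ R + k * ri = G + k * gi)) →
    simulate_training_loop (X + s * xi) (R + s * ri) (G + s * gi) xi ri gi s = n := by
  induction d with
  | zero =>
      intro X R G xi ri gi s n hn hcap heq _
      have hsn : s = n := by omega
      subst hsn
      rw [simulate_training_loop]
      have hcond : ¬ (X + s * xi ≠ R + s * ri ∨ R + s * ri ≠ G + s * gi) := by tauto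
      simp [hcond]
  | succ d ih =>
      intro X R G xi ri gi s n hn hcap heq hfirst
      rw [simulate_training_loop]
      have hne := hfirst s (le_refl s) (by omega)
      have hcond : (X + s * xi ≠ R + s * ri ∨ R + s * ri ≠ G + s * gi) := by tauto
      simp only [if_pos hcond]
      have hle : ¬ (s + 1 > 1000) := by omega
      simp only [if_neg hle]
      have hx : X + s * xi + xi = X + (s + 1) * xi := by ring
      have hr : R + s * ri + ri = R + (s + 1) * ri := by ring
      have hg : G + s * gi + gi = G + (s + 1) * gi := by ring
      rw [hx, hr, hg]
      exact ih X R G xi ri gi (s + 1) n (by omega) hcap heq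
        (fun k hk hk2 => hfirst k (by omega) hk2)

-- A in terms of "no hit in [0,1000]"
lemma A_none (X R G xi ri gi : Int)
    (h : ∀ k : Int, 0 ≤ k → k ≤ 1000 →
      ¬(X + k * xi = R + k * ri ∧ R + k * ri = G + k * gi)) :
    simulate_training X R G xi ri gi = -1 := by
  have := loop_none 1000 X R G xi ri gi 0 (by norm_num) (fun k hk => h k hk)
  simpa [simulate_training] using this

-- A in terms of a first hit n
lemma A_hit (X R G xi ri gi n : Int) (hn : 0 ≤ n) (hcap : n ≤ 1000)
    (heq : X + n * xi = R + n * ri ∧ R + n * ri = G + n * gi)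
    (hfirst : ∀ k : Int, 0 ≤ k → k < n →
      ¬(X + k * xi = R + k * ri ∧ R + k * ri = G + k * gi)) :
    simulate_training X R G xi ri gi = n := by
  have := loop_hit n.toNat X R G xi ri gi 0 n (by omega) hcap heq (fun k hk => hfirst k hk)
  simpa [simulate_training] using this

-- state equality at step k ↔ the two solved linear equations
lemma eq3_iff (X R G xi ri gi k : Int) :
    (X + k * xi = R + k * ri ∧ R + k * ri = G + k * gi) ↔
      (k * (xi - ri) = R - X ∧ k * (ri - gi) = G - R) := by
  rw [lin_iff, lin_iff]

-- ===== VERDICT (by name: the statement is the Claim_ definition above) =====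
theorem simulate_training_spec : Claim_equal_simulate_training := by
  intro X R G xi ri gi _
  unfold Spec_simulate_training
  unfold simulate_training_alt
  cases h1 : solveLin (xi - ri) (R - X) with
  | noSol =>
      have hno := (solveLin_none_iff _ _).mp h1
      simp only []
      rw [A_none]
      intro k hk _ hkEq
      exact hno k hk ((eq3_iff X R G xi ri gi k).mp hkEq).1
  | all =>
      obtain ⟨hc1, hd1⟩ := (solveLin_all_iff _ _).mp h1
      cases h2 : solveLin (ri - gi) (G - R) with
      | noSol =>
          have hno := (solveLin_none_iff _ _).mp h2
          simp only []
          rw [A_none]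
          intro k hk _ hkEq
          exact hno k hk ((eq3_iff X R G xi ri gi k).mp hkEq).2
      | all =>
          obtain ⟨hc2, hd2⟩ := (solveLin_all_iff _ _).mp h2
          simp only [capB]
          rw [A_hit X R G xi ri gi 0 le_rfl (by norm_num)]
          · norm_num
          · exact (eq3_iff X R G xi ri gi 0).mpr (by simp [hc1, hd1, hc2, hd2])
          · intro k hk hk0; omega
      | val n =>
          obtain ⟨hc2, hm2, hn2⟩ := (solveLin_val_iff _ _ _).mp h2
          by_cases hcap : n ≤ 1000
          · simp only [capB, if_pos hcap]
            apply A_hit X R G xi ri gi n hn2 hcap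
            · exact (eq3_iff X R G xi ri gi n).mpr ⟨by simp [hc1, hd1], hm2⟩
            · intro k hk hkn hkEq
              have := ((eq3_iff X R G xi ri gi k).mp hkEq).2
              have : k = n := mul_right_cancel₀ hc2 (by rw [this, hm2])
              omega
          · simp only [capB, if_neg hcap]
            rw [A_none]
            intro k hk hk1000 hkEq
            have := ((eq3_iff X R G xi ri gi k).mp hkEq).2
            have : k = n := mul_right_cancel₀ hc2 (by rw [this, hm2])
            omega
  | val n1 =>
      obtain ⟨hc1, hm1, hn1⟩ := (solveLin_val_iff _ _ _).mp h1
      cases h2 : solveLin (ri - gi) (G - R) with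
      | noSol =>
          have hno := (solveLin_none_iff _ _).mp h2
          simp only []
          rw [A_none]
          intro k hk _ hkEq
          exact hno k hk ((eq3_iff X R G xi ri gi k).mp hkEq).2
      | all =>
          obtain ⟨hc2, hd2⟩ := (solveLin_all_iff _ _).mp h2
          by_cases hcap : n1 ≤ 1000
          · simp only [capB, if_pos hcap]
            apply A_hit X R G xi ri gi n1 hn1 hcap
            · exact (eq3_iff X R G xi ri gi n1).mpr ⟨hm1, by simp [hc2, hd2]⟩
            · intro k hk hkn hkEq
              have := ((eq3_iff X R G xi ri gi k).mp hkEq).1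
              have : k = n1 := mul_right_cancel₀ hc1 (by rw [this, hm1])
              omega
          · simp only [capB, if_neg hcap]
            rw [A_none]
            intro k hk hk1000 hkEq
            have := ((eq3_iff X R G xi ri gi k).mp hkEq).1
            have : k = n1 := mul_right_cancel₀ hc1 (by rw [this, hm1])
            omega
      | val n2 =>
          obtain ⟨hc2, hm2, hn2⟩ := (solveLin_val_iff _ _ _).mp h2
          by_cases hne : n1 ≠ n2
          · simp only [if_pos hne]
            rw [A_none]
            intro k hk _ hkEq
            obtain ⟨e1, e2⟩ := (eq3_iff X R G xi ri gi k).mp hkEq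
            have hk1 : k = n1 := mul_right_cancel₀ hc1 (by rw [e1, hm1])
            have hk2 : k = n2 := mul_right_cancel₀ hc2 (by rw [e2, hm2])
            omega
          · simp only [if_neg hne]
            rw [not_not] at hne
            subst hne
            by_cases hcap : n1 ≤ 1000
            · simp only [capB, if_pos hcap]
              apply A_hit X R G xi ri gi n1 hn1 hcap
              · exact (eq3_iff X R G xi ri gi n1).mpr ⟨hm1, hm2⟩
              · intro k hk hkn hkEq
                have := ((eq3_iff X R G xi ri gi k).mp hkEq).1
                have : k = n1 := mul_right_cancel₀ hc1 (by rw [this, hm1])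
                omega
            · simp only [capB, if_neg hcap]
              rw [A_none]
              intro k hk hk1000 hkEq
              have := ((eq3_iff X R G xi ri gi k).mp hkEq).1
              have : k = n1 := mul_right_cancel₀ hc1 (by rw [this, hm1])
              omega
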